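-- pv_equiv track=rewrite | github.com/ArunAryal/ImageToolKit | tools/metadata.py | classify_metadata
-- ===== SOURCE A (Python) =====
-- SENSITIVE_FIELDS={
--      "GPSInfo", "Make", "Model", "Software",
--     "DateTime", "DateTimeOriginal", "DateTimeDigitized",
--     "SerialNumber", "LensSerialNumber", "CameraOwnerName",
--     "BodySerialNumber", "MakerNote"
-- }
--
-- def classify_metadata(metadata:dict)->dict:
--     sensitive: dict[str, object] = {}
--     normal: dict[str, object] = {}
--     for key,value in metadata.items():
--         if key in SENSITIVE_FIELDS:
--             sensitive[key]=value
--         else: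
--             normal[key]=value
--     return {"sensitive":sensitive,"normal":normal}
-- ===== SOURCE B (Python) =====
-- SENSITIVE_FIELDS={
--      "GPSInfo", "Make", "Model", "Software",
--     "DateTime", "DateTimeOriginal", "DateTimeDigitized",
--     "SerialNumber", "LensSerialNumber", "CameraOwnerName",
--     "BodySerialNumber", "MakerNote"
-- }
--
-- def classify_metadata(metadata: dict) -> dict:
--     # divide and conquer: split the item list in halves, classify each half,
--     # combine the half results with dict merges (no mutable accumulators)
--     def split(items):
--         if not items:
--             return {}, {}
--         if len(items) == 1:
--             key, value = items[0]
--             if key in SENSITIVE_FIELDS: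
--                 return {key: value}, {}
--             return {}, {key: value}
--         mid = len(items) // 2
--         ls, ln = split(items[:mid])
--         rs, rn = split(items[mid:])
--         return {**ls, **rs}, {**ln, **rn}
--     sensitive, normal = split(list(metadata.items()))
--     return {"sensitive": sensitive, "normal": normal}
-- ===== Notes on version B (the rewrite author's own statement) =====
-- stated objective: alternative
-- what changed: Replaces A's single forward loop mutating two accumulator dicts with a divide-and-conquer recursion: split the item list in halves, classify each half, and combine the halves with dict merges ({**left, **right}).
import Mathlib
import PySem

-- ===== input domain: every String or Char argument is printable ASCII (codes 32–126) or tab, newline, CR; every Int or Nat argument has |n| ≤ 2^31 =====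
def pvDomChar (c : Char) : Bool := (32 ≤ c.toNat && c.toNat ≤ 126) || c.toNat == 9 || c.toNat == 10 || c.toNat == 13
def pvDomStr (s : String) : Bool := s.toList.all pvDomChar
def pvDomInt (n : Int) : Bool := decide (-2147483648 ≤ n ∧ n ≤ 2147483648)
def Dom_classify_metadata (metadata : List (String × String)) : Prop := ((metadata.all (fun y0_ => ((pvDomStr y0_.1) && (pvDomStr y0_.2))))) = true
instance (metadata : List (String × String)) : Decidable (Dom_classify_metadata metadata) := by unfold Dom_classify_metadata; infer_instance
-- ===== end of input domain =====

-- B replaces A's single forward loop with two mutable accumulator dicts by a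
-- divide-and-conquer split (halve the item list, classify each half, merge the
-- half results with dict merges); return values proved identical (alternative).

-- SENSITIVE_FIELDS is a set used only for membership tests; held as its element list.
def pvSensitiveFields : List String :=
  ["GPSInfo", "Make", "Model", "Software",
   "DateTime", "DateTimeOriginal", "DateTimeDigitized",
   "SerialNumber", "LensSerialNumber", "CameraOwnerName",
   "BodySerialNumber", "MakerNote"]

-- ===== PORT A =====
-- one pass: for key,value in metadata.items(): branch into the two accumulator dicts
def classify_metadata (metadata : List (String × String)) : List (String × List (String × String)) :=
  let st := metadata.foldl
    (fun (st : PySem.Dict String String × PySem.Dict String String) kv =>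
      if pvSensitiveFields.contains kv.1 then (st.1.insert kv.1 kv.2, st.2)
      else (st.1, st.2.insert kv.1 kv.2))
    (PySem.Dict.empty, PySem.Dict.empty)
  [("sensitive", st.1.items), ("normal", st.2.items)]

-- ===== PORT B =====
-- {**a, **b}: a's entries (a is a dict, keys already unique) followed by b's entries
-- inserted over them — exact Python dict-merge semantics (position of first insertion,
-- value of last).
def pvMerge (a b : PySem.Dict String String) : PySem.Dict String String :=
  b.items.foldl (fun d kv => d.insert kv.1 kv.2) a

-- def split(items): divide and conquer over items (items[:mid] / items[mid:] with
-- mid = len(items)//2 are List.take/List.drop — exact for these nonnegative bounds).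
def pvSplit : List (String × String) → PySem.Dict String String × PySem.Dict String String
  | [] => (PySem.Dict.empty, PySem.Dict.empty)
  | [(k, v)] =>
      if pvSensitiveFields.contains k then (PySem.Dict.empty.insert k v, PySem.Dict.empty)
      else (PySem.Dict.empty, PySem.Dict.empty.insert k v)
  | a :: b :: t =>
      let items := a :: b :: t
      let mid := items.length / 2
      let l := pvSplit (items.take mid)
      let r := pvSplit (items.drop mid)
      (pvMerge l.1 r.1, pvMerge l.2 r.2)
  termination_by items => items.length
  decreasing_by
  all_goals simp
  all_goals omega

def classify_metadata_alt (metadata : List (String × String)) : List (String × List (String × String)) :=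
  let p := pvSplit metadata
  [("sensitive", p.1.items), ("normal", p.2.items)]

-- ===== PRECONDITION & SPEC =====
def Spec_classify_metadata (metadata : List (String × String)) (out : List (String × List (String × String))) : Prop := out = classify_metadata_alt metadata
instance (metadata : List (String × String)) (out : List (String × List (String × String))) : Decidable (Spec_classify_metadata metadata out) := by unfold Spec_classify_metadata; infer_instance

-- ===== CLAIM =====
def Claim_equal_classify_metadata : Prop := ∀ (metadata : List (String × String)), Dom_classify_metadata metadata → Spec_classify_metadata metadata (classify_metadata metadata)

-- ===== LEMMAS AND PROOFS =====

-- two inserts at distinct keys commute as DICTS (not just lookups) when the first key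
-- is already present, since its position is then fixed
theorem pvCC (d : PySem.Dict String String) (k v : String) (p : String × String)
    (hc : d.contains k = true) (hne : p.1 ≠ k) :
    (d.insert k v).insert p.1 p.2 = (d.insert p.1 p.2).insert k v := by
  apply PySem.Dict.ext
  have hck : (d.insert p.1 p.2).contains k = true := by
    rw [PySem.Dict.contains_insert]; simp [hc]
  by_cases hp : d.contains p.1 = true
  · have hp1 : (d.insert k v).contains p.1 = true := by
      rw [PySem.Dict.contains_insert]; simp [hp]
    rw [PySem.Dict.items_insert_of_contains _ _ hp1,
        PySem.Dict.items_insert_of_contains _ _ hc,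
        PySem.Dict.items_insert_of_contains _ _ hck,
        PySem.Dict.items_insert_of_contains _ _ hp,
        List.map_map, List.map_map]
    apply List.map_congr_left
    intro q _
    by_cases h1 : q.1 = k <;> by_cases h2 : q.1 = p.1 <;>
      simp [Function.comp, h1, h2, hne, Ne.symm hne]
  · have hp1 : (d.insert k v).contains p.1 = false := by
      rw [PySem.Dict.contains_insert]
      simp [hp, show (p.1 == k) = false by simp [hne]]
    rw [PySem.Dict.items_insert_of_not_contains _ _ hp1,
        PySem.Dict.items_insert_of_contains _ _ hc,
        PySem.Dict.items_insert_of_contains _ _ hck,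
        PySem.Dict.items_insert_of_not_contains _ _ (by simpa using hp),
        List.map_append]
    simp [hne]

-- the final overwrite of an already-present key commutes past inserting keys ≠ k
theorem pvC1 (k v : String) :
    ∀ (l : List (String × String)) (d : PySem.Dict String String),
      d.contains k = true → k ∉ l.map Prod.fst →
      l.foldl (fun d kv => d.insert kv.1 kv.2) (d.insert k v)
        = (l.foldl (fun d kv => d.insert kv.1 kv.2) d).insert k v := by
  intro l
  induction l with
  | nil => intro d _ _; rfl
  | cons p t ih =>
      intro d hc hk
      simp only [List.map_cons, List.mem_cons, not_or] at hk
      obtain ⟨hne, hkt⟩ := hk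
      simp only [List.foldl_cons]
      rw [pvCC d k v p hc (fun h => hne h.symm)]
      exact ih (d.insert p.1 p.2) (by rw [PySem.Dict.contains_insert]; simp [hc]) hkt

-- folding an items list with one key's value rewritten = folding the original then overwriting
theorem pvCmap (k v : String) :
    ∀ (l : List (String × String)) (e : PySem.Dict String String),
      (l.map Prod.fst).Nodup → k ∈ l.map Prod.fst →
      (l.map (fun p => if p.1 == k then (k, v) else p)).foldl
          (fun d kv => d.insert kv.1 kv.2) e
        = (l.foldl (fun d kv => d.insert kv.1 kv.2) e).insert k v := by
  intro l
  induction l with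
  | nil => intro e _ h; simp at h
  | cons p t ih =>
      intro e hnd hk
      simp only [List.map_cons, List.nodup_cons] at hnd
      by_cases hpk : p.1 = k
      · have hkt : k ∉ t.map Prod.fst := hpk ▸ hnd.1
        have ht : t.map (fun p => if p.1 == k then (k, v) else p) = t.map id :=
          List.map_congr_left (fun q hq => by
            have : q.1 ≠ k := fun h => hkt (h ▸ List.mem_map_of_mem hq)
            simp [this])
        rw [List.map_id] at ht
        simp only [List.map_cons, List.foldl_cons, hpk, beq_self_eq_true, if_pos, ht]
        rw [← pvC1 k v t (e.insert k p.2)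
              (by rw [PySem.Dict.contains_insert]; simp) hkt,
            PySem.Dict.insert_insert_self]
      · have hk' : k ∈ t.map Prod.fst := by
          rcases List.mem_cons.mp hk with h | h
          · exact absurd h.symm hpk
          · exact h
        simp only [List.map_cons, List.foldl_cons,
          show (p.1 == k) = false by simp [hpk], if_neg, Bool.false_eq_true,
          not_false_eq_true]
        exact ih (e.insert p.1 p.2) hnd.2 hk'

-- inserting (d.insert k v).items = inserting d.items then overwriting k (d's keys unique)
theorem pvC (d e : PySem.Dict String String) (k v : String) (hnd : d.keys.Nodup) :
    ((d.insert k v).items).foldl (fun d kv => d.insert kv.1 kv.2) e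
      = (d.items.foldl (fun d kv => d.insert kv.1 kv.2) e).insert k v := by
  by_cases hc : d.contains k = true
  · rw [PySem.Dict.items_insert_of_contains _ _ hc]
    have hkeys : d.keys = d.items.map Prod.fst := by
      simp only [PySem.Dict.keys]
    exact pvCmap k v d.items e (by rw [← hkeys]; exact hnd)
      (by rw [← hkeys, ← PySem.Dict.contains_iff_mem_keys]; exact hc)
  · rw [PySem.Dict.items_insert_of_not_contains _ _ (by simpa using hc),
        List.foldl_append]
    rfl

-- replaying a dict built from t (its deduplicated items) into e = inserting t into e
theorem pvG :
    ∀ (t : List (String × String)) (d e : PySem.Dict String String), d.keys.Nodup →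
      ((t.foldl (fun d kv => d.insert kv.1 kv.2) d).items).foldl
          (fun d kv => d.insert kv.1 kv.2) e
        = t.foldl (fun d kv => d.insert kv.1 kv.2)
            (d.items.foldl (fun d kv => d.insert kv.1 kv.2) e) := by
  intro t
  induction t with
  | nil => intro d e _; rfl
  | cons kv t ih =>
      intro d e hnd
      simp only [List.foldl_cons]
      rw [ih (d.insert kv.1 kv.2) e (PySem.Dict.nodup_keys_insert d kv.1 kv.2 hnd),
          pvC d e kv.1 kv.2 hnd]

-- dict merge of two forward-built dicts = forward build of the concatenation
theorem pvMerge_foldl (l1 l2 : List (String × String)) :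
    pvMerge (l1.foldl (fun d kv => d.insert kv.1 kv.2) PySem.Dict.empty)
            (l2.foldl (fun d kv => d.insert kv.1 kv.2) PySem.Dict.empty)
      = (l1 ++ l2).foldl (fun d kv => d.insert kv.1 kv.2) PySem.Dict.empty := by
  unfold pvMerge
  rw [List.foldl_append,
      pvG l2 PySem.Dict.empty _ PySem.Dict.nodup_keys_empty]
  rfl

-- B's divide and conquer = the pair of forward-built dicts over the two filtered lists
theorem pvSplit_eq (items : List (String × String)) :
    pvSplit items
      = ((items.filter (fun kv => pvSensitiveFields.contains kv.1)).foldl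
           (fun d kv => d.insert kv.1 kv.2) PySem.Dict.empty,
         (items.filter (fun kv => !pvSensitiveFields.contains kv.1)).foldl
           (fun d kv => d.insert kv.1 kv.2) PySem.Dict.empty) := by
  induction items using pvSplit.induct with
  | case1 => simp [pvSplit]
  | case2 k v h =>
      have h' : k ∈ pvSensitiveFields := by simpa using h
      simp [pvSplit, h']
  | case3 k v h =>
      have h' : k ∉ pvSensitiveFields := by simpa using h
      simp [pvSplit, h']
  | case4 a b t items mid ih1 ih2 =>
      simp only [pvSplit]
      rw [ih1, ih2, pvMerge_foldl, pvMerge_foldl, ← List.filter_append,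
        ← List.filter_append, List.take_append_drop]

-- A's paired branching fold equals the two filter-then-insert folds
theorem pvFold_eq_filter (p : String × String → Bool) :
    ∀ (l : List (String × String)) (d1 d2 : PySem.Dict String String),
      l.foldl
        (fun (st : PySem.Dict String String × PySem.Dict String String) kv =>
          if p kv then (st.1.insert kv.1 kv.2, st.2) else (st.1, st.2.insert kv.1 kv.2))
        (d1, d2)
      = ((l.filter p).foldl (fun d kv => d.insert kv.1 kv.2) d1,
         (l.filter (fun kv => !p kv)).foldl (fun d kv => d.insert kv.1 kv.2) d2) := by
  intro l
  induction l with
  | nil => intro d1 d2; simp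
  | cons kv t ih =>
      intro d1 d2
      by_cases h : p kv = true <;> simp [h, ih]

-- ===== VERDICT =====
theorem classify_metadata_spec : Claim_equal_classify_metadata := by
  intro metadata _
  show _ = _
  unfold classify_metadata classify_metadata_alt
  rw [pvFold_eq_filter, pvSplit_eq]
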